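-- pv_equiv track=rewrite | github.com/drgnfrts/IS111 | content/week05/ice5/e-ice5_3.py | sum_of_neighbours
-- ===== SOURCE A (Python) =====
-- def sum_of_neighbours(input_list):
--     if len(input_list) == 0 or len(input_list) == 1:
--         return input_list
--     # if len(input_list) == 2: -> no need, handled by the for loop scenarios
--     #     sum_of_two = input_list[0] + input_list[1]
--     #     return [sum_of_two, sum_of_two]
--     return_list = []
--     for i in range(len(input_list)):
--         if i == 0:
--             return_list.append(input_list[i] + input_list[i + 1])
--             # OR return_list.append(sum(input_list[i:i+2]))
--         elif i == len(input_list) - 1: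
--             return_list.append(input_list[i - 1] + input_list[i])
--             # OR return_list.append(sum(input_list[i-1:i+1]))
--         else:
--             return_list.append(
--                 input_list[i - 1] + input_list[i] + input_list[i + 1])
--             # OR return_list.append(sum(input_list[i-1:i+2]))
--     return return_list
-- ===== SOURCE B (Python) =====
-- def sum_of_neighbours(input_list):
--     n = len(input_list)
--     if n <= 1:
--         return input_list
--     prefix = [0]
--     for x in input_list:
--         prefix.append(prefix[-1] + x)
--     return [prefix[min(i + 2, n)] - prefix[max(i - 1, 0)] for i in range(n)]
-- ===== Notes on version B (the rewrite author's own statement) =====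
-- stated objective: alternative
-- what changed: B builds a prefix-sum array in one pass and computes each output as a difference prefix[min(i+2,n)] - prefix[max(i-1,0)] of two prefix sums, instead of A's per-position branching that adds the neighbours directly.
import Mathlib
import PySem

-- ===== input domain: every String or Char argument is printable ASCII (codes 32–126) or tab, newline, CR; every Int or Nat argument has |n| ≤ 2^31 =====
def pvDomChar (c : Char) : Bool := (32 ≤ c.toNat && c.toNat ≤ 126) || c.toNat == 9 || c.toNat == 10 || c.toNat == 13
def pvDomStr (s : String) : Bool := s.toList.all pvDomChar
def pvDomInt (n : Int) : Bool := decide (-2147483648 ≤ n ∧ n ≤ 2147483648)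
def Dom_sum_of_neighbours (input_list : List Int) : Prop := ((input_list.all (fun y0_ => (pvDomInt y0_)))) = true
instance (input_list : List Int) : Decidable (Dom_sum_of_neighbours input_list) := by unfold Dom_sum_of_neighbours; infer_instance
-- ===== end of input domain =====

-- B computes each neighbour sum as a difference of two entries of a prefix-sum array built in one
-- pass (window [max(i-1,0), min(i+2,n))), instead of A's per-position branching with direct adds
-- (objective: alternative).

-- ===== PORT A =====
-- indices in the loop body are always in range (n ≥ 2 and the branch taken bounds i), so getD 0 is exact
def sum_of_neighbours (input_list : List Int) : List Int :=
  if input_list.length = 0 ∨ input_list.length = 1 then input_list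
  else
    (List.range input_list.length).foldl (fun return_list i =>
      if i = 0 then
        return_list ++ [input_list.getD i 0 + input_list.getD (i + 1) 0]
      else if i = input_list.length - 1 then
        return_list ++ [input_list.getD (i - 1) 0 + input_list.getD i 0]
      else
        return_list ++ [input_list.getD (i - 1) 0 + input_list.getD i 0 + input_list.getD (i + 1) 0]) []

-- ===== PORT B =====
-- prefix[-1] is pre.getLast! (pre is never empty); all getD accesses are in range, so getD 0 is exact
def sum_of_neighbours_alt (input_list : List Int) : List Int :=
  let n := input_list.length
  if n ≤ 1 then input_list
  else
    let pre := input_list.foldl (fun pre x => pre ++ [pre.getLast! + x]) [(0 : Int)]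
    (List.range n).map (fun i => pre.getD (min (i + 2) n) 0 - pre.getD (max (i - 1) 0) 0)

-- ===== PRECONDITION & SPEC =====
def Spec_sum_of_neighbours (input_list : List Int) (out : List Int) : Prop := out = sum_of_neighbours_alt input_list
instance (input_list : List Int) (out : List Int) : Decidable (Spec_sum_of_neighbours input_list out) := by unfold Spec_sum_of_neighbours; infer_instance

-- ===== CLAIM (what is proved, stated in full; the proofs are below) =====
def Claim_equal_sum_of_neighbours : Prop := ∀ (input_list : List Int), Dom_sum_of_neighbours input_list → Spec_sum_of_neighbours input_list (sum_of_neighbours input_list)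

-- ===== LEMMAS AND PROOFS =====

-- running partial sums starting from s
def psums (s : Int) : List Int → List Int
  | [] => []
  | x :: xs => (s + x) :: psums (s + x) xs

theorem foldl_pre_eq (l : List Int) : ∀ (acc : List Int) (s : Int), acc ≠ [] → acc.getLast! = s →
    l.foldl (fun pre x => pre ++ [pre.getLast! + x]) acc = acc ++ psums s l := by
  induction l with
  | nil => intro acc s _ _; simp [psums]
  | cons x xs ih =>
    intro acc s hne hl
    have hstep : (acc ++ [acc.getLast! + x]).getLast! = s + x := by
      rw [hl]; simp [List.getLast!_eq_getLast?_getD]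
    have h := ih (acc ++ [acc.getLast! + x]) (s + x) (by simp) hstep
    rw [hl] at h
    rw [List.foldl_cons, hl, h, psums]
    simp

theorem psums_getD (l : List Int) : ∀ (s : Int) (k : Nat), k < l.length →
    (psums s l).getD k 0 = s + (l.take (k + 1)).sum := by
  induction l with
  | nil => intro s k h; simp at h
  | cons x xs ih =>
    intro s k h
    cases k with
    | zero => simp [psums]
    | succ j =>
      have hj : j < xs.length := by simpa using h
      rw [show psums s (x :: xs) = (s + x) :: psums (s + x) xs from rfl,
        List.getD_cons_succ, ih (s + x) j hj, List.take_succ_cons, List.sum_cons]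
      ring

theorem pre_getD (l : List Int) (k : Nat) (hk : k ≤ l.length) :
    (l.foldl (fun pre x => pre ++ [pre.getLast! + x]) [(0 : Int)]).getD k 0 = (l.take k).sum := by
  rw [foldl_pre_eq l [(0 : Int)] 0 (by simp) (by rfl)]
  cases k with
  | zero => simp
  | succ j =>
    have hj : j < l.length := by omega
    rw [List.singleton_append, List.getD_cons_succ, psums_getD l 0 j hj]
    simp

theorem take_sum_succ (l : List Int) (k : Nat) (hk : k < l.length) :
    (l.take (k + 1)).sum = (l.take k).sum + l.getD k 0 := by
  induction l generalizing k with
  | nil => simp at hk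
  | cons x xs ih =>
    cases k with
    | zero => simp
    | succ j =>
      have hj : j < xs.length := by simpa using hk
      simp only [List.take_succ_cons, List.sum_cons, ih j hj, List.getD_cons_succ]
      ring

theorem sum_of_neighbours_eq_alt (l : List Int) :
    sum_of_neighbours l = sum_of_neighbours_alt l := by
  by_cases hs : l.length = 0 ∨ l.length = 1
  · have h1 : l.length ≤ 1 := by rcases hs with h | h <;> omega
    rw [sum_of_neighbours, sum_of_neighbours_alt, if_pos hs]
    simp [h1]
  · have h2 : 2 ≤ l.length := by
      rcases Nat.lt_or_ge l.length 2 with h | h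
      · exact absurd (by omega) hs
      · exact h
    unfold sum_of_neighbours sum_of_neighbours_alt
    rw [if_neg hs]
    simp only [if_neg (by omega : ¬ l.length ≤ 1)]
    have hbody : (fun (return_list : List Int) (i : Nat) =>
        if i = 0 then return_list ++ [l.getD i 0 + l.getD (i + 1) 0]
        else if i = l.length - 1 then return_list ++ [l.getD (i - 1) 0 + l.getD i 0]
        else return_list ++ [l.getD (i - 1) 0 + l.getD i 0 + l.getD (i + 1) 0])
      = fun (return_list : List Int) (i : Nat) => return_list ++
          [if i = 0 then l.getD i 0 + l.getD (i + 1) 0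
           else if i = l.length - 1 then l.getD (i - 1) 0 + l.getD i 0
           else l.getD (i - 1) 0 + l.getD i 0 + l.getD (i + 1) 0] := by
      funext acc i; split_ifs <;> rfl
    rw [hbody, PySem.List.foldl_append_singleton_eq_map]
    apply List.ext_getElem
    · simp
    · intro i h₁ h₂
      have hi : i < l.length := by simpa using h₁
      simp only [List.nil_append, List.getElem_map, List.getElem_range]
      rw [pre_getD l (min (i + 2) l.length) (by omega),
          pre_getD l (max (i - 1) 0) (by omega)]
      by_cases h0 : i = 0
      · subst h0
        rw [if_pos rfl]
        have : min 2 l.length = 2 := by omega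
        rw [this]
        simp only [Nat.zero_sub, Nat.max_self, List.take_zero, List.sum_nil]
        rw [take_sum_succ l 1 (by omega), take_sum_succ l 0 (by omega)]
        simp
      · by_cases hl : i = l.length - 1
        · rw [if_neg h0, if_pos hl]
          have e1 : min (i + 2) l.length = l.length := by omega
          have e2 : max (i - 1) 0 = l.length - 2 := by omega
          rw [e1, e2]
          have e3 : l.length = (l.length - 2) + 1 + 1 := by omega
          rw [show l.take l.length = l.take ((l.length - 2) + 1 + 1) by rw [← e3]]
          rw [take_sum_succ l ((l.length - 2) + 1) (by omega),
              take_sum_succ l (l.length - 2) (by omega)]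
          have e4 : l.length - 2 + 1 = i := by omega
          have e5 : l.length - 2 = i - 1 := by omega
          rw [e4, e5]; ring
        · rw [if_neg h0, if_neg hl]
          have e1 : min (i + 2) l.length = i + 2 := by omega
          have e2 : max (i - 1) 0 = i - 1 := by omega
          rw [e1, e2]
          have e3 : i + 2 = (i - 1) + 1 + 1 + 1 := by omega
          rw [e3, take_sum_succ l ((i - 1) + 1 + 1) (by omega),
              take_sum_succ l ((i - 1) + 1) (by omega),
              take_sum_succ l (i - 1) (by omega)]
          have e4 : i - 1 + 1 = i := by omega
          rw [e4]; ring

-- ===== VERDICT (by name: the statement is the Claim_ definition above) =====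
theorem sum_of_neighbours_spec : Claim_equal_sum_of_neighbours := by
  intro l _
  exact sum_of_neighbours_eq_alt l
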